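-- pv_equiv track=rewrite | github.com/busenursoker/Hand-Writing-Reading-Model | api.py | _generate_candidates_conservative
-- ===== SOURCE A (Python) =====
-- from itertools import product
--
-- TR_MAP = {
--     "c": ["c", "ç"],
--     "g": ["g", "ğ"],
--     "o": ["o", "ö"],
--     "u": ["u", "ü"],
--     "s": ["s", "ş"],
--     "C": ["C", "Ç"],
--     "G": ["G", "Ğ"],
--     "O": ["O", "Ö"],
--     "U": ["U", "Ü"],
--     "S": ["S", "Ş"],
--     "I": ["I", "İ"],  # İstanbul gibi
-- }
--
-- def _generate_candidates_conservative(word: str, max_changes: int = 2, max_candidates: int = 120) -> list[str]: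
--     options = [TR_MAP.get(ch, [ch]) for ch in word]
--     cands = []
--     for tup in product(*options):
--         cand = "".join(tup)
--         changes = sum(1 for a, b in zip(word, cand) if a != b)
--         if changes <= max_changes:
--             cands.append(cand)
--             if len(cands) >= max_candidates:
--                 break
--     return cands
-- ===== SOURCE B (Python) =====
-- TR_ALT = {
--     "c": "ç", "g": "ğ", "o": "ö", "u": "ü", "s": "ş",
--     "C": "Ç", "G": "Ğ", "O": "Ö", "U": "Ü", "S": "Ş", "I": "İ",
-- }
--
-- def _generate_candidates_conservative(word: str, max_changes: int = 2, max_candidates: int = 120) -> list[str]: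
--     # Explicit-stack DFS over subsets (size <= max_changes) of the convertible
--     # positions, emitted in itertools.product order and stopped at the cap:
--     # only valid candidates are ever visited (no 2^k scan, no filtering).
--     # A frame is (ci, start, rem, pre): next convertible-position index, char
--     # index the prefix covers, remaining budget, and the prefix built so far.
--     if max_changes < 0:
--         return []
--     conv = [i for i, ch in enumerate(word) if ch in TR_ALT]
--     k = len(conv)
--     out = []
--     stack = [(0, 0, max_changes, "")]
--     while stack:
--         ci, start, rem, pre = stack.pop()
--         if rem > 0:
--             for j in range(ci, k):
--                 p = conv[j]
--                 stack.append((j + 1, p + 1, rem - 1, pre + word[start:p] + TR_ALT[word[p]]))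
--         out.append(pre + word[start:])
--         if len(out) >= max_candidates:
--             return out
--     return out
-- ===== Notes on version B (the rewrite author's own statement) =====
-- stated objective: faster
-- what changed: A expands the full itertools.product over all convertible positions and filters/caps each tuple with an O(n) change count; B runs an explicit-stack DFS over subsets of the precomputed convertible positions, building each candidate from shared prefixes and word slices, so it visits only valid candidates in the identical product order and stops at the cap.
import Mathlib
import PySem

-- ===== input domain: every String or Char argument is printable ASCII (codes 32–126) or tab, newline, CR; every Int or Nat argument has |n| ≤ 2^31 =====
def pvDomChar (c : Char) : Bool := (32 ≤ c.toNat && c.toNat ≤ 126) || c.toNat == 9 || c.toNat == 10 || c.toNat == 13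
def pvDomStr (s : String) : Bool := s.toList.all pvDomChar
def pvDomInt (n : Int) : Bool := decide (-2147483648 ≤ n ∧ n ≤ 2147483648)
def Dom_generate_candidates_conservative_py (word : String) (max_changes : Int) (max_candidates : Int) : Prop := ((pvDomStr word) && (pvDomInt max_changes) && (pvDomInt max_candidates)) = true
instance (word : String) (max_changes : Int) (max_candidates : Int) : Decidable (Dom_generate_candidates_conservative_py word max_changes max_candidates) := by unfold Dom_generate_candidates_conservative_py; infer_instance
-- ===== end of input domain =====

-- B replaces A's filtered scan of the full itertools.product expansion by an explicit-stack
-- DFS over subsets of the convertible positions, emitting the same candidates in the same order.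


-- ===== PORT A =====
-- TR_MAP.get(ch, [ch]); each Python option is a 1-char string, represented as a Char.
def trMapA (ch : Char) : List Char :=
  if ch = 'c' then ['c', 'ç'] else if ch = 'g' then ['g', 'ğ']
  else if ch = 'o' then ['o', 'ö'] else if ch = 'u' then ['u', 'ü']
  else if ch = 's' then ['s', 'ş'] else if ch = 'C' then ['C', 'Ç']
  else if ch = 'G' then ['G', 'Ğ'] else if ch = 'O' then ['O', 'Ö']
  else if ch = 'U' then ['U', 'Ü'] else if ch = 'S' then ['S', 'Ş']
  else if ch = 'I' then ['I', 'İ'] else [ch]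

-- itertools.product(*options): first option varies slowest, exactly this order.
def prodA : List (List Char) → List (List Char)
  | [] => [[]]
  | o :: os => o.flatMap (fun x => (prodA os).map (fun t => x :: t))

-- sum(1 for a, b in zip(word, cand) if a != b); cand's chars are exactly the tuple t.
def changesA (w t : List Char) : Nat := ((w.zip t).filter (fun p => p.1 != p.2)).length

-- the for-loop over product(*options) with append / cap-break ("".join(tup) = String.ofList t)
def loopA (w : List Char) (m cap : Int) : List (List Char) → List String → List String
  | [], cands => cands
  | t :: rest, cands =>
    if (changesA w t : Int) ≤ m then
      let cands' := cands ++ [String.ofList t]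
      if (cands'.length : Int) ≥ cap then cands' else loopA w m cap rest cands'
    else loopA w m cap rest cands

def generate_candidates_conservative_py (word : String) (max_changes : Int) (max_candidates : Int) : List String :=
  loopA word.toList max_changes max_candidates (prodA (word.toList.map trMapA)) []

-- ===== PORT B =====
-- TR_ALT.get(ch) / `ch in TR_ALT`
def trAltB (ch : Char) : Option Char :=
  if ch = 'c' then some 'ç' else if ch = 'g' then some 'ğ'
  else if ch = 'o' then some 'ö' else if ch = 'u' then some 'ü'
  else if ch = 's' then some 'ş' else if ch = 'C' then some 'Ç'
  else if ch = 'G' then some 'Ğ' else if ch = 'O' then some 'Ö'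
  else if ch = 'U' then some 'Ü' else if ch = 'S' then some 'Ş'
  else if ch = 'I' then some 'İ' else none

-- TR_ALT[ch]; exact here: only ever applied at a convertible position, so the lookup hits
def altOf (ch : Char) : Char := (trAltB ch).getD ch

-- conv = [i for i, ch in enumerate(word) if ch in TR_ALT]
def convLoop : List Char → Nat → List Nat
  | [], _ => []
  | c :: cs, i => if (trAltB c).isSome then i :: convLoop cs (i + 1) else convLoop cs (i + 1)

-- a frame (ci, start, rem, pre) keeps ci as the suffix conv[ci:]; word[start:p] is exact
-- as (w.drop start).take (p - start) since 0 ≤ start ≤ p ≤ len(word) by construction.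
-- the `for j in range(ci, k): stack.append(...)` loop
def pushLoopB (w : List Char) : List Nat → Nat → Int → List Char →
    List (List Nat × Nat × Int × List Char) → List (List Nat × Nat × Int × List Char)
  | [], _, _, _, st => st
  | p :: rest, start, rem, pre, st =>
      pushLoopB w rest start rem pre
        ((rest, p + 1, rem - 1,
          pre ++ (w.drop start).take (p - start) ++ [altOf (w.getD p ' ')]) :: st)

-- termination measure for the outer while-loop
def stackW (st : List (List Nat × Nat × Int × List Char)) : Nat :=
  (st.map (fun f => 2 ^ f.1.length)).sum

theorem pushLoopB_w (w : List Char) : ∀ (cs : List Nat) (start : Nat) (rem : Int)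
    (pre : List Char) st,
    stackW (pushLoopB w cs start rem pre st) + 1 ≤ stackW st + 2 ^ cs.length := by
  intro cs
  induction cs with
  | nil => intro start rem pre st; simp [pushLoopB]
  | cons p rest ih =>
    intro start rem pre st
    simp only [pushLoopB]
    have h := ih start rem pre
      ((rest, p + 1, rem - 1,
        pre ++ (w.drop start).take (p - start) ++ [altOf (w.getD p ' ')]) :: st)
    have hp : (2 : Nat) ^ (p :: rest).length = 2 ^ rest.length + 2 ^ rest.length := by
      rw [List.length_cons, pow_succ]; ring
    simp only [stackW, List.map_cons, List.sum_cons] at h ⊢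
    omega

-- the outer `while stack:` loop with append / cap-return
def loopB (w : List Char) (cap : Int) :
    List (List Nat × Nat × Int × List Char) → List String → List String
  | [], out => out
  | (cs, start, rem, pre) :: st, out =>
    let st' := if rem > 0 then pushLoopB w cs start rem pre st else st
    let out' := out ++ [String.ofList (pre ++ w.drop start)]
    if (out'.length : Int) ≥ cap then out' else loopB w cap st' out'
  termination_by st _ => stackW st
  decreasing_by
    have h := pushLoopB_w w cs start rem pre st
    have hp : 0 < 2 ^ cs.length := Nat.two_pow_pos _
    simp only [stackW, List.map_cons, List.sum_cons] at h ⊢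
    split <;> omega

def generate_candidates_conservative_py_alt (word : String) (max_changes : Int) (max_candidates : Int) : List String :=
  if max_changes < 0 then []
  else loopB word.toList max_candidates [(convLoop word.toList 0, 0, max_changes, [])] []

-- ===== PRECONDITION & SPEC =====
def Spec_generate_candidates_conservative_py (word : String) (max_changes : Int) (max_candidates : Int) (out : List String) : Prop := out = generate_candidates_conservative_py_alt word max_changes max_candidates
instance (word : String) (max_changes : Int) (max_candidates : Int) (out : List String) : Decidable (Spec_generate_candidates_conservative_py word max_changes max_candidates out) := by unfold Spec_generate_candidates_conservative_py; infer_instance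

-- ===== CLAIM (what is proved, stated in full; the proofs are below) =====
def Claim_equal_generate_candidates_conservative_py : Prop := ∀ (word : String) (max_changes : Int) (max_candidates : Int), Dom_generate_candidates_conservative_py word max_changes max_candidates → Spec_generate_candidates_conservative_py word max_changes max_candidates (generate_candidates_conservative_py word max_changes max_candidates)

-- ===== LEMMAS AND PROOFS =====

-- effective cap: both programs append before testing len >= cap, so one item always survives
def capN (cap : Int) : Nat := if cap ≤ 1 then 1 else cap.toNat

theorem capN_pos (cap : Int) : 1 ≤ capN cap := by unfold capN; split_ifs <;> omega

theorem capN_eq_of_ge (cap : Int) (k : Nat) (h1 : 1 ≤ k) (hk : (k : Int) ≥ cap)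
    (hlt : k ≤ capN cap) : capN cap = k := by
  unfold capN at hlt ⊢; split_ifs at hlt ⊢ <;> omega

theorem lt_capN_of_lt (cap : Int) (k : Nat) (h : (k : Int) < cap) : k < capN cap := by
  unfold capN; split_ifs <;> omega

-- A's result before the cap: filtered, joined product tuples
def filtA (w : List Char) (m : Int) (l : List (List Char)) : List String :=
  l.filterMap (fun t => if (changesA w t : Int) ≤ m then some (String.ofList t) else none)

theorem filtA_cons_pos (w : List Char) (m : Int) (t : List Char) (l : List (List Char))
    (h : (changesA w t : Int) ≤ m) : filtA w m (t :: l) = String.ofList t :: filtA w m l := by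
  simp [filtA, h]

theorem filtA_cons_neg (w : List Char) (m : Int) (t : List Char) (l : List (List Char))
    (h : ¬ (changesA w t : Int) ≤ m) : filtA w m (t :: l) = filtA w m l := by
  simp [filtA, h]

theorem loopA_take (w : List Char) (m cap : Int) :
    ∀ (l : List (List Char)) (cands : List String), cands.length < capN cap →
      loopA w m cap l cands = cands ++ (filtA w m l).take (capN cap - cands.length) := by
  intro l
  induction l with
  | nil => intro cands h; simp [loopA, filtA]
  | cons t rest ih =>
    intro cands h
    have hlen : (cands ++ [String.ofList t]).length = cands.length + 1 := by simp
    by_cases hc : (changesA w t : Int) ≤ m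
    · rw [filtA_cons_pos w m t rest hc]
      obtain ⟨k, hk⟩ : ∃ k, capN cap - cands.length = k + 1 :=
        ⟨capN cap - cands.length - 1, by omega⟩
      rw [hk, List.take_succ_cons]
      simp only [loopA, if_pos hc]
      by_cases hcap : ((cands ++ [String.ofList t]).length : Int) ≥ cap
      · rw [if_pos hcap]
        have hN : capN cap = cands.length + 1 := by
          refine capN_eq_of_ge cap (cands.length + 1) (by omega) ?_ (by omega)
          rw [hlen] at hcap; exact_mod_cast hcap
        have hk0 : k = 0 := by omega
        simp [hk0]
      · rw [if_neg hcap]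
        have hcap' : ((cands.length + 1 : Nat) : Int) < cap := by
          rw [hlen] at hcap; push_cast at hcap ⊢; omega
        have hlt : (cands ++ [String.ofList t]).length < capN cap := by
          rw [hlen]; exact lt_capN_of_lt cap _ hcap'
        rw [ih _ hlt]
        have hk' : capN cap - (cands ++ [String.ofList t]).length = k := by rw [hlen]; omega
        rw [hk']
        simp [List.append_assoc]
    · rw [filtA_cons_neg w m t rest hc]
      simp only [loopA, if_neg hc]
      exact ih cands h

-- B's result before the cap: candidates of a frame in product order, substitutions deferred
def enumS (w : List Char) : List Nat → Nat → Int → List Char → List String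
  | [], start, _, pre => [String.ofList (pre ++ w.drop start)]
  | p :: rest, start, rem, pre =>
    enumS w rest start rem pre ++
      (if rem > 0 then
        enumS w rest (p + 1) (rem - 1)
          (pre ++ (w.drop start).take (p - start) ++ [altOf (w.getD p ' ')])
       else [])

def framesOf (w : List Char) : List Nat → Nat → Int → List Char →
    List (List Nat × Nat × Int × List Char)
  | [], _, _, _ => []
  | p :: rest, start, rem, pre =>
    framesOf w rest start rem pre ++
      [(rest, p + 1, rem - 1,
        pre ++ (w.drop start).take (p - start) ++ [altOf (w.getD p ' ')])]

theorem pushLoopB_spec (w : List Char) : ∀ (cs : List Nat) (start : Nat) (rem : Int)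
    (pre : List Char) st,
    pushLoopB w cs start rem pre st = framesOf w cs start rem pre ++ st := by
  intro cs
  induction cs with
  | nil => intro start rem pre st; simp [pushLoopB, framesOf]
  | cons p rest ih =>
    intro start rem pre st
    simp only [pushLoopB, framesOf]
    rw [ih]
    simp

def enumFrames (w : List Char) (st : List (List Nat × Nat × Int × List Char)) : List String :=
  st.flatMap (fun f => enumS w f.1 f.2.1 f.2.2.1 f.2.2.2)

theorem enumFrames_append (w : List Char) (a b : List (List Nat × Nat × Int × List Char)) :
    enumFrames w (a ++ b) = enumFrames w a ++ enumFrames w b := by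
  simp [enumFrames]

theorem enumS_frames (w : List Char) : ∀ (cs : List Nat) (start : Nat) (rem : Int)
    (pre : List Char),
    enumS w cs start rem pre = String.ofList (pre ++ w.drop start) ::
      enumFrames w (if rem > 0 then framesOf w cs start rem pre else []) := by
  intro cs
  induction cs with
  | nil =>
    intro start rem pre
    by_cases h0 : rem > 0 <;> simp [enumS, framesOf, enumFrames, h0]
  | cons p rest ih =>
    intro start rem pre
    by_cases h0 : rem > 0
    · simp only [enumS, h0, if_true, framesOf]
      rw [ih start rem pre]
      simp only [h0, if_true, enumFrames_append]
      have h1 : enumFrames w [(rest, p + 1, rem - 1,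
          pre ++ (w.drop start).take (p - start) ++ [altOf (w.getD p ' ')])]
          = enumS w rest (p + 1) (rem - 1)
              (pre ++ (w.drop start).take (p - start) ++ [altOf (w.getD p ' ')]) := by
        simp [enumFrames]
      rw [h1]
      simp
    · simp only [enumS, h0, if_false, List.append_nil]
      rw [ih start rem pre]
      simp [h0]

theorem loopB_take (w : List Char) (cap : Int) :
    ∀ (W : Nat) (st : List (List Nat × Nat × Int × List Char)) (out : List String),
      stackW st ≤ W → out.length < capN cap →
      loopB w cap st out = out ++ (enumFrames w st).take (capN cap - out.length) := by
  intro W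
  induction W with
  | zero =>
    intro st out hW h
    cases st with
    | nil => simp [loopB, enumFrames]
    | cons f st =>
      exfalso
      have hp : 0 < 2 ^ f.1.length := Nat.two_pow_pos _
      simp only [stackW, List.map_cons, List.sum_cons] at hW
      omega
  | succ W ih =>
    intro st out hW h
    cases st with
    | nil => simp [loopB, enumFrames]
    | cons f st =>
      obtain ⟨cs, start, rem, pre⟩ := f
      have hst' : (if rem > 0 then pushLoopB w cs start rem pre st else st)
          = (if rem > 0 then framesOf w cs start rem pre else []) ++ st := by
        by_cases h0 : rem > 0 <;> simp [h0, pushLoopB_spec]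
      have hEF : enumFrames w ((cs, start, rem, pre) :: st) =
          String.ofList (pre ++ w.drop start) ::
            enumFrames w ((if rem > 0 then framesOf w cs start rem pre else []) ++ st) := by
        have hsplit : (cs, start, rem, pre) :: st = [(cs, start, rem, pre)] ++ st := rfl
        rw [hsplit, enumFrames_append, enumFrames_append]
        have h1 : enumFrames w [(cs, start, rem, pre)] = enumS w cs start rem pre := by
          simp [enumFrames]
        rw [h1, enumS_frames]
        simp
      have hlen : (out ++ [String.ofList (pre ++ w.drop start)]).length = out.length + 1 := by
        simp
      obtain ⟨k, hk⟩ : ∃ k, capN cap - out.length = k + 1 :=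
        ⟨capN cap - out.length - 1, by omega⟩
      simp only [loopB, hst']
      rw [hEF, hk, List.take_succ_cons]
      by_cases hcap : ((out ++ [String.ofList (pre ++ w.drop start)]).length : Int) ≥ cap
      · rw [if_pos hcap]
        have hN : capN cap = out.length + 1 := by
          refine capN_eq_of_ge cap (out.length + 1) (by omega) ?_ (by omega)
          rw [hlen] at hcap; exact_mod_cast hcap
        have hk0 : k = 0 := by omega
        simp [hk0]
      · rw [if_neg hcap]
        have hW' : stackW ((if rem > 0 then framesOf w cs start rem pre else []) ++ st) ≤ W := by
          rw [← hst']
          by_cases h0 : rem > 0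
        -- rem > 0: the pushed frames' weight is bounded by pushLoopB_w
          · have hd := pushLoopB_w w cs start rem pre st
            simp only [stackW, List.map_cons, List.sum_cons] at hW hd ⊢
            simp only [h0, if_true]
            omega
          · have hp : 0 < 2 ^ cs.length := Nat.two_pow_pos _
            simp only [stackW, List.map_cons, List.sum_cons] at hW ⊢
            simp only [h0, if_false]
            omega
        have hcap' : ((out.length + 1 : Nat) : Int) < cap := by
          rw [hlen] at hcap; push_cast at hcap ⊢; omega
        have hlt : (out ++ [String.ofList (pre ++ w.drop start)]).length < capN cap := by
          rw [hlen]; exact lt_capN_of_lt cap _ hcap'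
        rw [ih _ _ hW' hlt]
        have hk' : capN cap - (out ++ [String.ofList (pre ++ w.drop start)]).length = k := by
          rw [hlen]; omega
        rw [hk']
        simp [List.append_assoc]

-- the two tables agree
set_option maxHeartbeats 1600000 in
theorem trMapA_eq (ch : Char) : trMapA ch =
    match trAltB ch with | some a => [ch, a] | none => [ch] := by
  unfold trMapA trAltB
  split_ifs <;> subst_vars <;> rfl

set_option maxHeartbeats 1600000 in
theorem trAltB_ne (ch a : Char) (h : trAltB ch = some a) : (ch != a) = true := by
  unfold trAltB at h
  split_ifs at h <;> cases h <;> subst_vars <;> decide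

theorem changesA_cons (ch x : Char) (w t : List Char) :
    changesA (ch :: w) (x :: t) = changesA w t + (if (ch != x) = true then 1 else 0) := by
  simp only [changesA, List.zip_cons_cons, List.filter_cons]
  by_cases h : (ch != x) = true
  · simp [h]
  · simp [h]

theorem convLoop_ge : ∀ (cs : List Char) (i : Nat) (p : Nat), p ∈ convLoop cs i → i ≤ p := by
  intro cs
  induction cs with
  | nil => intro i p hp; simp [convLoop] at hp
  | cons c rest ih =>
    intro i p hp
    simp only [convLoop] at hp
    split at hp
    · rcases List.mem_cons.mp hp with h | h
      · omega
      · have := ih (i + 1) p h; omega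
    · have := ih (i + 1) p hp; omega

-- a frame's enumeration does not change when one kept character moves from the lazy
-- suffix into the explicit prefix
theorem enumS_shift (w : List Char) : ∀ (cs : List Nat) (c : Char) (rest' : List Char)
    (start : Nat) (rem : Int) (pre : List Char),
    w.drop start = c :: rest' → (∀ p ∈ cs, start < p) →
    enumS w cs start rem pre = enumS w cs (start + 1) rem (pre ++ [c]) := by
  intro cs
  induction cs with
  | nil =>
    intro c rest' start rem pre h hcs
    have hd : w.drop (start + 1) = rest' := by
      have h2 := congrArg (List.drop 1) h
      simpa [List.drop_drop, Nat.add_comm] using h2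
    simp [enumS, h, hd]
  | cons p rest ih =>
    intro c rest' start rem pre h hcs
    have hd : w.drop (start + 1) = rest' := by
      have h2 := congrArg (List.drop 1) h
      simpa [List.drop_drop, Nat.add_comm] using h2
    have hps : start < p := hcs p (by simp)
    have htake : (w.drop start).take (p - start)
        = c :: (w.drop (start + 1)).take (p - (start + 1)) := by
      rw [h, hd, show p - start = (p - (start + 1)) + 1 by omega, List.take_succ_cons]
    simp only [enumS]
    rw [ih c rest' start rem pre h (by intro q hq; exact hcs q (by simp [hq]))]
    rw [htake]
    simp [List.append_assoc]

-- CORE: a frame's DFS enumerates exactly A's filtered product, in order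
theorem enumS_filtA (w : List Char) : ∀ (ws : List Char) (start : Nat),
    ws = w.drop start → ∀ (rem : Int), 0 ≤ rem → ∀ (pre : List Char),
    enumS w (convLoop ws start) start rem pre
      = (prodA (ws.map trMapA)).filterMap
          (fun t => if (changesA ws t : Int) ≤ rem then some (String.ofList (pre ++ t)) else none) := by
  intro ws
  induction ws with
  | nil =>
    intro start hws rem hrem pre
    have h0 : ((changesA [] [] : Nat) : Int) ≤ rem := by simp [changesA]; omega
    simp only [convLoop, enumS, List.map_nil, prodA, List.filterMap_cons, List.filterMap_nil,
      h0, if_pos]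
    simp [← hws]
  | cons c cs ih =>
    intro start hws rem hrem pre
    have hdrop : w.drop (start + 1) = cs := by
      have h2 := congrArg (List.drop 1) hws.symm
      simpa [List.drop_drop, Nat.add_comm] using h2
    have hget : w.getD start ' ' = c := by
      have h1 : w[start]? = some c := by
        have h2 := congrArg (fun l => l[0]?) hws.symm
        simpa [List.getElem?_drop] using h2
      simp [List.getD_eq_getElem?_getD, h1]
    have hshift : ∀ (rem' : Int) (pre' : List Char),
        enumS w (convLoop cs (start + 1)) start rem' pre'
          = enumS w (convLoop cs (start + 1)) (start + 1) rem' (pre' ++ [c]) := by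
      intro rem' pre'
      exact enumS_shift w _ c cs start rem' pre' (by rw [← hws])
        (by intro q hq; have := convLoop_ge cs (start + 1) q hq; omega)
    simp only [List.map_cons, prodA, trMapA_eq c]
    cases halt : trAltB c with
    | none =>
      simp only [convLoop, halt, Option.isSome_none, Bool.false_eq_true, if_false,
        List.flatMap_cons, List.flatMap_nil, List.append_nil, List.filterMap_map]
      rw [hshift rem pre, ih (start + 1) hdrop.symm rem hrem (pre ++ [c])]
      congr 1
      funext t
      rw [Function.comp_apply, changesA_cons]
      simp
    | some a =>
      have hne := trAltB_ne c a halt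
      simp only [convLoop, halt, Option.isSome_some, if_true]
      simp only [enumS, Nat.sub_self, List.take_zero, List.append_nil, hget, altOf, halt,
        Option.getD_some]
      simp only [List.flatMap_cons, List.flatMap_nil, List.append_nil,
        List.filterMap_append, List.filterMap_map]
      congr 1
      · rw [hshift rem pre, ih (start + 1) hdrop.symm rem hrem (pre ++ [c])]
        congr 1
        funext t
        rw [Function.comp_apply, changesA_cons]
        simp
      · by_cases h0 : rem > 0
        · rw [if_pos h0, ih (start + 1) hdrop.symm (rem - 1) (by omega) (pre ++ [a])]
          congr 1
          funext t
          rw [Function.comp_apply, changesA_cons]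
          simp only [hne, if_pos]
          by_cases hcond : ((changesA cs t : Nat) : Int) ≤ rem - 1
          · have hc2 : ((changesA cs t + 1 : Nat) : Int) ≤ rem := by
              push_cast at hcond ⊢; omega
            rw [if_pos hcond, if_pos hc2]
            simp [List.append_assoc]
          · have hc2 : ¬ ((changesA cs t + 1 : Nat) : Int) ≤ rem := by
              push_cast at hcond ⊢; omega
            rw [if_neg hcond, if_neg hc2]
        · rw [if_neg h0]
          symm
          rw [List.filterMap_eq_nil_iff]
          intro t ht
          rw [Function.comp_apply, changesA_cons]
          simp only [hne, if_pos]
          have hc2 : ¬ ((changesA cs t + 1 : Nat) : Int) ≤ rem := by omega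
          rw [if_neg hc2]

-- when max_changes < 0 nothing passes A's filter
theorem filtA_neg (w : List Char) (m : Int) (hm : m < 0) (l : List (List Char)) :
    filtA w m l = [] := by
  rw [filtA, List.filterMap_eq_nil_iff]
  intro t ht
  have hc : ¬ ((changesA w t : Nat) : Int) ≤ m := by omega
  simp [hc]

-- ===== VERDICT (by name: the statement is the Claim_ definition above) =====
theorem generate_candidates_conservative_py_spec : Claim_equal_generate_candidates_conservative_py := by
  intro word m cap _
  unfold Spec_generate_candidates_conservative_py
  unfold generate_candidates_conservative_py generate_candidates_conservative_py_alt
  have h0 : ([] : List String).length < capN cap := by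
    have := capN_pos cap; simp; omega
  rw [loopA_take word.toList m cap (prodA (word.toList.map trMapA)) [] h0]
  by_cases hm : m < 0
  · rw [if_pos hm, filtA_neg _ _ hm]
    simp
  · rw [if_neg hm]
    rw [loopB_take word.toList cap (stackW [(convLoop word.toList 0, 0, m, [])])
      [(convLoop word.toList 0, 0, m, [])] [] le_rfl h0]
    have h1 : enumFrames word.toList [(convLoop word.toList 0, 0, m, [])]
        = enumS word.toList (convLoop word.toList 0) 0 m [] := by
      simp [enumFrames]
    rw [h1, enumS_filtA word.toList word.toList 0 (by simp) m (by omega) []]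
    have h2 : (fun t => if ((changesA word.toList t : Nat) : Int) ≤ m then
        some (String.ofList ([] ++ t)) else none) =
        (fun t => if ((changesA word.toList t : Nat) : Int) ≤ m then
        some (String.ofList t) else none) := by
      funext t; simp
    rw [h2]
    simp [filtA]
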